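-- pv_equiv track=rewrite | github.com/HydTechie/MailRoomDigital | OCRExtractor/testing.py | names
-- ===== SOURCE A (Python) =====
-- def names(nlist):
--     suffixes = ['Jr.','Sr.','Jnr','Snr']
--     new_list_names = nlist
--     no_value =''
--     new_list_names1 = [i.strip() for i in new_list_names]
--     if (len(new_list_names1)==4):
--         pass
--     elif (len(new_list_names1)>2 and len(new_list_names1)<4):
--         if new_list_names1[1] in suffixes:
--             new_list_names1.append(no_value)
--         else:
--             new_list_names1.append(no_value)
--             x = new_list_names1[1]
--             y = new_list_names1[2]
--             new_list_names1[1] = no_value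
--             new_list_names1[2] = x
--             new_list_names1[3] = y
--     elif(len(new_list_names1)>1 and len(new_list_names1)<3):
--         if new_list_names1[1] in suffixes:
--             new_list_names1.append(no_value)
--             new_list_names1.append(no_value)
--         else:
--             new_list_names1.append(no_value)
--             new_list_names1.append(no_value)
--             z = new_list_names1[1]
--             new_list_names1[1] = no_value
--             new_list_names1[2] = z
--     elif(len(new_list_names1)>0 and len(new_list_names1)<2):
--         new_list_names1.append(no_value)
--         new_list_names1.append(no_value)
--         new_list_names1.append(no_value)
--     else:
--         if new_list_names1[1] in suffixes:
--             new_list_names1 = new_list_names1[0:4]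
--         else:
--             new_list_names1 = new_list_names1[0:4]
--             r = new_list_names1[1]
--             h = new_list_names1[2]
--             new_list_names1[1] = no_value
--             new_list_names1[2] = r
--             new_list_names1[3] = h
--     return new_list_names1
-- ===== SOURCE B (Python) =====
-- def names(nlist):
--     suffixes = ['Jr.', 'Sr.', 'Jnr', 'Snr']
--     s = [i.strip() for i in nlist]
--     first = s[0]
--     if len(s) == 4:
--         return s
--     rest = s[1:] if (len(s) >= 2 and s[1] in suffixes) else [''] + s[1:]
--     out = ([first] + rest)[:4]
--     while len(out) < 4:
--         out.append('')
--     return out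
-- ===== Notes on version B (the rewrite author's own statement) =====
-- stated objective: simpler
-- what changed: Replaces A's four explicit per-length branches with positional index reassignments by a single suffix-shift decision plus concatenate/slice/pad-to-4.
import Mathlib
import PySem

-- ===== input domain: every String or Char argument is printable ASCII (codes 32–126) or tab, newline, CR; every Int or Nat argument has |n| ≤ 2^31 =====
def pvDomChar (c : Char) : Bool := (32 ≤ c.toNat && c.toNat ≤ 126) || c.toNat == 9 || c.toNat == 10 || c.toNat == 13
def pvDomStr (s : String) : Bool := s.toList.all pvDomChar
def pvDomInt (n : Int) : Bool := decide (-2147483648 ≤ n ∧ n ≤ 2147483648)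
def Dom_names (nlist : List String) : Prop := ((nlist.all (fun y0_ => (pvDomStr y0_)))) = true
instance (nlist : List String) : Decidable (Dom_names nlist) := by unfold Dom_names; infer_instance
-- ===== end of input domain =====

-- B replaces A's four per-length branches with index reassignments by one suffix-shift
-- decision plus concatenate/slice/pad-to-4 (objective: simpler).

-- ===== PORT A =====
def pySuffixes : List String := ["Jr.", "Sr.", "Jnr", "Snr"]

-- literal transliteration of A; list index reads use getD "" (in range inside Pre_),
-- index assignment li[i] = v is List.set i v
def names (nlist : List String) : List String :=
  let s := nlist.map PySem.Str.strip
  if s.length == 4 then s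
  else if 2 < s.length ∧ s.length < 4 then
    if s.getD 1 "" ∈ pySuffixes then s ++ [""]
    else
      let t := s ++ [""]
      let x := t.getD 1 ""
      let y := t.getD 2 ""
      ((t.set 1 "").set 2 x).set 3 y
  else if 1 < s.length ∧ s.length < 3 then
    if s.getD 1 "" ∈ pySuffixes then (s ++ [""]) ++ [""]
    else
      let t := (s ++ [""]) ++ [""]
      let z := t.getD 1 ""
      (t.set 1 "").set 2 z
  else if 0 < s.length ∧ s.length < 2 then ((s ++ [""]) ++ [""]) ++ [""]
  else
    if s.getD 1 "" ∈ pySuffixes then PySem.List.slice s (some 0) (some 4)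
    else
      let t := PySem.List.slice s (some 0) (some 4)
      let r := t.getD 1 ""
      let h := t.getD 2 ""
      ((t.set 1 "").set 2 r).set 3 h

-- ===== PORT B =====
-- literal transliteration of Source B: s[0] read under Pre_ (nonempty), s[1:] = drop 1,
-- the pad-while-loop is appending 4 - len copies of ""
def names_alt (nlist : List String) : List String :=
  let s := nlist.map PySem.Str.strip
  let first := s.getD 0 ""
  if s.length == 4 then s
  else
    let rest := if 2 ≤ s.length ∧ s.getD 1 "" ∈ pySuffixes then s.drop 1 else "" :: s.drop 1
    let out := PySem.List.slice (first :: rest) (some 0) (some 4)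
    out ++ List.replicate (4 - out.length) ""

-- ===== PRECONDITION & SPEC =====
-- Pre_ excludes only the empty list, on which Python A raises IndexError (s[1] in the final else).
def Pre_names (nlist : List String) : Prop := nlist ≠ []
instance (nlist : List String) : Decidable (Pre_names nlist) := by unfold Pre_names; infer_instance
def pvWitness_names : List String := ["Ann", "Jr."]

def Spec_names (nlist : List String) (out : List String) : Prop := out = names_alt nlist
instance (nlist : List String) (out : List String) : Decidable (Spec_names nlist out) := by unfold Spec_names; infer_instance

-- ===== CLAIM (what is proved, stated in full; the proofs are below) =====
def Claim_equal_names : Prop := ∀ (nlist : List String), Dom_names nlist → Pre_names nlist → Spec_names nlist (names nlist)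

-- ===== LEMMAS AND PROOFS =====
theorem names_eq_of_ne_nil (s : List String) (h : s ≠ []) :
    (if s.length == 4 then s
     else if 2 < s.length ∧ s.length < 4 then
       if s.getD 1 "" ∈ pySuffixes then s ++ [""]
       else
         let t := s ++ [""]
         ((t.set 1 "").set 2 (t.getD 1 "")).set 3 (t.getD 2 "")
     else if 1 < s.length ∧ s.length < 3 then
       if s.getD 1 "" ∈ pySuffixes then (s ++ [""]) ++ [""]
       else
         let t := (s ++ [""]) ++ [""]
         (t.set 1 "").set 2 (t.getD 1 "")
     else if 0 < s.length ∧ s.length < 2 then ((s ++ [""]) ++ [""]) ++ [""]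
     else
       if s.getD 1 "" ∈ pySuffixes then PySem.List.slice s (some 0) (some 4)
       else
         let t := PySem.List.slice s (some 0) (some 4)
         ((t.set 1 "").set 2 (t.getD 1 "")).set 3 (t.getD 2 ""))
    =
    (if s.length == 4 then s
     else
       let rest := if 2 ≤ s.length ∧ s.getD 1 "" ∈ pySuffixes then s.drop 1 else "" :: s.drop 1
       let out := PySem.List.slice (s.getD 0 "" :: rest) (some 0) (some 4)
       out ++ List.replicate (4 - out.length) "") := by
  match s with
  | [] => exact absurd rfl h
  | [a] => simp [PySem.List.slice]
  | [a, b] =>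
      by_cases hb : b ∈ pySuffixes <;> simp [hb, PySem.List.slice]
  | [a, b, c] =>
      by_cases hb : b ∈ pySuffixes <;> simp [hb, PySem.List.slice]
  | [a, b, c, d] => simp
  | a :: b :: c :: d :: e :: rest =>
      have hget : (a :: b :: c :: d :: e :: rest).getD 1 "" = b := rfl
      simp only [hget, List.length]
      by_cases hb : b ∈ pySuffixes <;>
        simp only [hb, and_true, and_false] <;>
        split_ifs <;>
        first
          | (exfalso; omega)
          | simp [PySem.List.slice]

-- ===== VERDICT (by name: the statement is the Claim_ definition above) =====
theorem names_spec : Claim_equal_names := by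
  intro nlist _ hpre
  unfold Spec_names names names_alt
  exact names_eq_of_ne_nil (nlist.map PySem.Str.strip)
    (by simpa using hpre)
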